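-- pv_equiv track=rewrite | github.com/schollz/livecodingmusic | src/livecodingmusic/livecodingmusic.py | er
-- ===== SOURCE A (Python) =====
-- from collections import deque, OrderedDict
--
-- def er(steps, pulses, shift=0):
--     steps = int(steps)
--     pulses = int(pulses)
--     if pulses > steps:
--         raise ValueError
--     pattern = []
--     counts = []
--     remainders = []
--     divisor = steps - pulses
--     remainders.append(pulses)
--     level = 0
--     while True:
--         counts.append(divisor // remainders[level])
--         remainders.append(divisor % remainders[level])
--         divisor = remainders[level]
--         level = level + 1
--         if remainders[level] <= 1:
--             break
--     counts.append(divisor)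
--
--     def build(level):
--         if level == -1:
--             pattern.append(0)
--         elif level == -2:
--             pattern.append(1)
--         else:
--             for i in range(0, counts[level]):
--                 build(level - 1)
--             if remainders[level] != 0:
--                 build(level - 2)
--
--     build(level)
--     i = pattern.index(1)
--     pattern = pattern[i:] + pattern[0:i]
--     pattern = deque(pattern)
--     pattern.rotate(shift)
--     pattern = list(pattern)
--     return pattern
-- ===== SOURCE B (Python) =====
-- def er(steps, pulses, shift=0):
--     steps = int(steps)
--     pulses = int(pulses)
--     if pulses > steps:
--         raise ValueError
--     counts = []
--     remainders = [pulses]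
--     divisor = steps - pulses
--     level = 0
--     while True:
--         counts.append(divisor // remainders[level])
--         remainders.append(divisor % remainders[level])
--         divisor = remainders[level]
--         level += 1
--         if remainders[level] <= 1:
--             break
--     counts.append(divisor)
--     # bottom-up dynamic programming instead of top-down recursion:
--     # a = build(level-2), b = build(level-1) as pure list values
--     a, b = [1], [0]
--     for c, r in zip(counts, remainders):
--         a, b = b, b * c + (a if r != 0 else [])
--     pattern = b
--     # single combined rotation: rotate-to-first-1 and deque.rotate(shift) fused
--     n = len(pattern)
--     j = (pattern.index(1) - shift) % n
--     return pattern[j:] + pattern[:j]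
-- ===== Notes on version B (the rewrite author's own statement) =====
-- stated objective: simpler
-- what changed: The top-down recursive build over (counts, remainders) is replaced by a bottom-up dynamic-programming pass keeping the last two level patterns, and the two rotations (to the first 1, then deque.rotate(shift)) are fused into a single slice rotation.
-- outside the precondition, e.g. on er(5, 0, 0): A raises ZeroDivisionError, B raises ZeroDivisionError; on er(5, -1, 0): A raises ValueError, B raises ValueError; on er(2, 3, 0): A raises ValueError, B raises ValueError
import Mathlib
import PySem

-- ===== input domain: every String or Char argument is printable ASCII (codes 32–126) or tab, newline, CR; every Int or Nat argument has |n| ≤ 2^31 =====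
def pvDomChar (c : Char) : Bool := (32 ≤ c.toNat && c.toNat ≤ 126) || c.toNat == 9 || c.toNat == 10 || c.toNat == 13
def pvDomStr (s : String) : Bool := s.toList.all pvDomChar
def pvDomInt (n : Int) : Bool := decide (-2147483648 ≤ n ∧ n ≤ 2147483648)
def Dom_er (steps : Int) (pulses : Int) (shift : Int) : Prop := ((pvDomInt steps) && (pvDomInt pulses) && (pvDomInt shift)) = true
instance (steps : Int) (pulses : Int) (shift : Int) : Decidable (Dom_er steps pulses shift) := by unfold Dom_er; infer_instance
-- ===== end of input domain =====

-- B replaces the top-down recursive `build` by a bottom-up DP over (counts, remainders)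
-- and fuses the two rotations (to the first 1, then deque.rotate(shift)) into one slice;
-- objective: simpler (no recursion, one rotation).

-- ===== PORT A =====

-- the `while True` counts/remainders loop, shared verbatim by A and Source B
-- (returns: counts built by the loop, remainders appended by the loop, final divisor)
def pvEuclid (d : Int) (r : Int) : List Int × List Int × Int :=
  if _h0 : r = 0 then ([], [], 0)  -- Python raises ZeroDivisionError here (outside Pre_)
  else
    let c := PySem.Int.floordiv d r
    let r' := PySem.Int.mod d r
    if _hstop : r' ≤ 1 then ([c], [r'], r)
    else
      let t := pvEuclid r r'
      (c :: t.1, r' :: t.2.1, t.2.2)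
termination_by r.toNat
decreasing_by
  have hb : (0:Int) < r := by
    rcases lt_trichotomy r 0 with hr | hr | hr
    · have := PySem.Int.mod_neg_bounds d hr; omega
    · exact absurd hr _h0
    · exact hr
  have h1 : PySem.Int.mod d r < r := PySem.Int.mod_lt d hb
  omega

-- the recursive `build`, as a pure value; index `n` is Python's `level + 2`
def buildA (counts : List Int) (rems : List Int) : Nat → List Int
  | 0 => [1]                                  -- build(-2)
  | 1 => [0]                                  -- build(-1)
  | n + 2 =>                                  -- build(level) for level = n ≥ 0
      (List.replicate (counts.getD n 0).toNat (buildA counts rems (n + 1))).flatten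
        ++ (if rems.getD n 0 ≠ 0 then buildA counts rems n else [])

-- deque(p); p.rotate(s); list(p)
def pyRotateRight (xs : List Int) (s : Int) : List Int :=
  if xs.length = 0 then xs
  else
    let k := (PySem.Int.mod s (xs.length : Int)).toNat
    xs.drop (xs.length - k) ++ xs.take (xs.length - k)

def er (steps : Int) (pulses : Int) (shift : Int) : List Int :=
  if pulses > steps then []  -- Python raises ValueError here (outside Pre_)
  else
    let t := pvEuclid (steps - pulses) pulses
    let counts := t.1 ++ [t.2.2]
    let rems := pulses :: t.2.1
    let pattern := buildA counts rems (counts.length + 1)   -- build(level), level + 2 = len(counts) + 1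
    let i := (PySem.List.index? pattern 1).getD 0  -- Python .index raises when no 1 (outside Pre_)
    pyRotateRight (pattern.drop i ++ pattern.take i) shift

-- ===== PORT B =====

-- one step of Source B's DP loop: (a, b) -> (b, b * c + (a if r != 0 else []))
def dpStep (ab : List Int × List Int) (cr : Int × Int) : List Int × List Int :=
  (ab.2, (List.replicate cr.1.toNat ab.2).flatten ++ (if cr.2 ≠ 0 then ab.1 else []))

def er_alt (steps : Int) (pulses : Int) (shift : Int) : List Int :=
  if pulses > steps then []  -- Python raises ValueError here (outside Pre_)
  else
    let t := pvEuclid (steps - pulses) pulses   -- Source B keeps A's counts/remainders loop verbatim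
    let counts := t.1 ++ [t.2.2]
    let rems := pulses :: t.2.1
    let pattern := (List.foldl dpStep ([1], [0]) (counts.zip rems)).2
    let n := pattern.length
    if n = 0 then []  -- Python raises (index on empty) (outside Pre_)
    else
      let j := (PySem.Int.mod ((((PySem.List.index? pattern 1).getD 0 : Nat) : Int) - shift) (n : Int)).toNat
      pattern.drop j ++ pattern.take j

-- ===== PRECONDITION & SPEC =====
-- Pre_: Python A raises ValueError when pulses > steps or (via .index) when pulses < 1,
-- and ZeroDivisionError when pulses == 0; it returns normally exactly when 1 <= pulses <= steps.
def Pre_er (steps : Int) (pulses : Int) (shift : Int) : Prop := 1 ≤ pulses ∧ pulses ≤ steps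
instance (steps : Int) (pulses : Int) (shift : Int) : Decidable (Pre_er steps pulses shift) := by unfold Pre_er; infer_instance
def pvWitness_er : Int × Int × Int := (8, 5, 3)

def Spec_er (steps : Int) (pulses : Int) (shift : Int) (out : List Int) : Prop := out = er_alt steps pulses shift
instance (steps : Int) (pulses : Int) (shift : Int) (out : List Int) : Decidable (Spec_er steps pulses shift out) := by unfold Spec_er; infer_instance

-- ===== CLAIM (what is proved, stated in full; the proofs are below) =====
def Claim_equal_er : Prop := ∀ (steps : Int) (pulses : Int) (shift : Int), Dom_er steps pulses shift → Pre_er steps pulses shift → Spec_er steps pulses shift (er steps pulses shift)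

-- ===== LEMMAS AND PROOFS =====

-- the loop produces equally many counts and remainders
theorem pvEuclid_len (d r : Int) : (pvEuclid d r).1.length = (pvEuclid d r).2.1.length := by
  fun_induction pvEuclid d r with
  | case1 => simp
  | case2 => simp
  | case3 d r h0 c r' _hstop t ih => simpa using ih

-- Source B's DP loop computes (build(level-1), build(level)) bottom-up
theorem dp_foldl (C R : List Int) (ps : List (Int × Int)) (k : Nat)
    (h : ∀ j, j < ps.length → ps[j]? = some (C.getD (k + j) 0, R.getD (k + j) 0)) :
    List.foldl dpStep (buildA C R k, buildA C R (k + 1)) ps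
      = (buildA C R (k + ps.length), buildA C R (k + ps.length + 1)) := by
  induction ps generalizing k with
  | nil => simp
  | cons p ps ih =>
      have hp : p = (C.getD k 0, R.getD k 0) := by
        have := h 0 (by simp); simpa using this
      have hstep : dpStep (buildA C R k, buildA C R (k + 1)) p
          = (buildA C R (k + 1), buildA C R (k + 2)) := by
        subst hp; simp [dpStep, buildA]
      have ih' := ih (k + 1) (by
        intro j hj
        have := h (j + 1) (by simpa using Nat.succ_lt_succ hj)
        simpa [Nat.add_assoc, Nat.add_comm 1 j, Nat.add_left_comm] using this)
      simp only [List.foldl_cons, hstep, ih', List.length_cons]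
      have e1 : k + 1 + ps.length = k + (ps.length + 1) := by omega
      rw [e1]

-- the index used for the rotation never exceeds the pattern length
theorem index_getD_le (xs : List Int) (v : Int) : (PySem.List.index? xs v).getD 0 ≤ xs.length := by
  rcases hidx : PySem.List.index? xs v with _ | k
  · simp
  · obtain ⟨hk, -, -⟩ := PySem.List.getElem_of_index?_eq_some hidx
    simpa using Nat.le_of_lt hk

-- rotate-to-i followed by deque.rotate(s) equals the single rotation to ((i - s) mod n)
theorem rot_fuse (p : List Int) (i : Nat) (hi : i ≤ p.length) (hp : p ≠ []) (s : Int) :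
    pyRotateRight (p.drop i ++ p.take i) s
      = p.drop (PySem.Int.mod ((i : Int) - s) (p.length : Int)).toNat
        ++ p.take (PySem.Int.mod ((i : Int) - s) (p.length : Int)).toNat := by
  have hn : 0 < p.length := List.length_pos_iff.mpr hp
  have hnz : (0:Int) < (p.length : Int) := by exact_mod_cast hn
  set n := p.length with hdefn
  -- abbreviations
  set K : Int := PySem.Int.mod s (n : Int) with hK
  set J : Int := PySem.Int.mod ((i : Int) - s) (n : Int) with hJ
  have hK0 : 0 ≤ K := PySem.Int.mod_nonneg s hnz
  have hKn : K < (n : Int) := PySem.Int.mod_lt s hnz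
  have hJ0 : 0 ≤ J := PySem.Int.mod_nonneg _ hnz
  have hJn : J < (n : Int) := PySem.Int.mod_lt _ hnz
  have hKe : K = s % (n : Int) := by rw [hK, PySem.Int.mod_eq_emod_of_pos hnz]
  have hJe : J = ((i : Int) - s) % (n : Int) := by rw [hJ, PySem.Int.mod_eq_emod_of_pos hnz]
  have hq : p.drop i ++ p.take i = p.rotate i := (List.rotate_eq_drop_append_take hi).symm
  have hqlen : (p.drop i ++ p.take i).length = n := by
    simp only [List.length_append, List.length_drop, List.length_take, hdefn]
    omega
  have hkle : K.toNat ≤ n := by omega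
  have hrot : (p.drop i ++ p.take i).rotate (n - K.toNat)
      = (p.drop i ++ p.take i).drop (n - K.toNat) ++ (p.drop i ++ p.take i).take (n - K.toNat) :=
    List.rotate_eq_drop_append_take (by rw [hqlen]; omega)
  have hrr : pyRotateRight (p.drop i ++ p.take i) s = (p.rotate i).rotate (n - K.toNat) := by
    rw [pyRotateRight, if_neg (by rw [hqlen]; omega)]
    simp only [hqlen]
    rw [← hq, hrot]
  rw [hrr, List.rotate_rotate]
  have hJle : J.toNat ≤ n := by omega
  rw [show p.drop J.toNat ++ p.take J.toNat = p.rotate J.toNat from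
    (List.rotate_eq_drop_append_take (by omega)).symm]
  -- both sides are rotations; compare the amounts mod n
  rw [← List.rotate_mod p (i + (n - K.toNat)), ← List.rotate_mod p J.toNat]
  congr 1
  -- (i + (n - K.toNat)) % n = J.toNat % n  in Nat; move to Int
  have hdvd1 : (n : Int) ∣ s - K := by
    rw [hKe]; exact ⟨s / (n : Int), by linarith [Int.mul_ediv_add_emod s (n : Int)]⟩
  have hdvd2 : (n : Int) ∣ ((i : Int) - s) - J := by
    rw [hJe]; exact ⟨((i : Int) - s) / (n : Int), by linarith [Int.mul_ediv_add_emod ((i : Int) - s) (n : Int)]⟩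
  obtain ⟨q1, hq1⟩ := hdvd1
  obtain ⟨q2, hq2⟩ := hdvd2
  -- (i + n - K) = J + n * (q1 + q2 + 1) over Int
  have key : ((i : Int) + (n : Int) - K) = J + (n : Int) * (q1 + q2 + 1) := by
    rw [mul_add, mul_add, mul_one]; linarith
  have hcast : ((i + (n - K.toNat) : Nat) : Int) = (i : Int) + (n : Int) - K := by
    push_cast [hkle]; omega
  have hmod : (((i + (n - K.toNat)) % n : Nat) : Int) = ((J.toNat % n : Nat) : Int) := by
    rw [Int.natCast_mod, Int.natCast_mod, hcast, key,
      show ((J.toNat : Int)) = J from by omega]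
    exact Int.add_mul_emod_self_left J (n : Int) (q1 + q2 + 1)
  exact_mod_cast hmod

-- the two ports agree everywhere (the Pre_ hypothesis is not even needed)
theorem er_eq_alt (steps pulses shift : Int) : er steps pulses shift = er_alt steps pulses shift := by
  rw [er, er_alt]
  by_cases hps : pulses > steps
  · simp [hps]
  · simp only [if_neg hps]
    set t := pvEuclid (steps - pulses) pulses with ht
    set C : List Int := t.1 ++ [t.2.2] with hC
    set R : List Int := pulses :: t.2.1 with hR
    have hlen : R.length = C.length := by
      have hl := pvEuclid_len (steps - pulses) pulses
      rw [← ht] at hl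
      simp only [hC, hR, List.length_append, List.length_cons, List.length_nil]
      omega
    -- B's DP pattern equals A's recursive pattern
    have hzip : ∀ j, j < (C.zip R).length → (C.zip R)[j]? = some (C.getD j 0, R.getD j 0) := by
      intro j hj
      rw [List.length_zip] at hj
      have hjC : j < C.length := lt_of_lt_of_le hj (min_le_left _ _)
      have hjR : j < R.length := lt_of_lt_of_le hj (min_le_right _ _)
      simp [hjC, hjR,
        List.getD_eq_getElem?_getD]
    have hdp := dp_foldl C R (C.zip R) 0 (by simpa using hzip)
    have hzlen : (C.zip R).length = C.length := by
      simp [List.length_zip, hlen]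
    have hpat : (List.foldl dpStep ([1], [0]) (C.zip R)).2 = buildA C R (C.length + 1) := by
      have h0 : buildA C R 0 = [1] := rfl
      have h1 : buildA C R 1 = [0] := rfl
      rw [← h0, ← h1, hdp, hzlen]
      simp
    set P : List Int := buildA C R (C.length + 1) with hP
    rw [hpat]
    by_cases hPnil : P = []
    · simp [hPnil, pyRotateRight]
    · rw [if_neg (by simp [hPnil])]
      exact rot_fuse P ((PySem.List.index? P 1).getD 0) (index_getD_le P 1) hPnil shift

-- ===== VERDICT (by name: the statement is the Claim_ definition above) =====
theorem er_spec : Claim_equal_er := by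
  intro steps pulses shift _ _
  exact er_eq_alt steps pulses shift
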